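-- pv_equiv track=rewrite | github.com/ivanwakeup/algorithms | algorithms/prep/microsoft/max_possible_value.py | max_possible_value
-- ===== SOURCE A (Python) =====
-- def max_possible_value(value):
--     vs = list(str(value))
--     idx = 0
--     if value < 0:
--         for char in vs:
--             if char == "-":
--                 idx+=1
--                 continue
--             if int(char) > 5:
--                 break
--             idx+=1
--     else:
--         for i, char in enumerate(vs):
--             if int(char) > 5:
--                 idx = i+1
--     vs.insert(idx, str(5))
--     return int("".join(vs))
-- ===== SOURCE B (Python) =====
-- def max_possible_value(value):
--     s = str(value)
--     if value < 0:
--         d = s[1:]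
--         idx = 1 + max([j for j in range(len(d) + 1) if all(c <= '5' for c in d[:j])])
--     else:
--         idx = min([k for k in range(len(s) + 1) if all(c <= '5' for c in s[k:])])
--     return int(s[:idx] + '5' + s[idx:])
-- ===== Notes on version B (the rewrite author's own statement) =====
-- stated objective: alternative
-- what changed: Replaces A's single-pass index-tracking scans with generate-and-test: B enumerates every insertion position of the string, keeps those whose suffix (non-negative) or prefix of the digit part (negative) consists of characters <= '5', selects the minimal resp. maximal such position with min()/max(), and splices '5' in by slicing.
import Mathlib
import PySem

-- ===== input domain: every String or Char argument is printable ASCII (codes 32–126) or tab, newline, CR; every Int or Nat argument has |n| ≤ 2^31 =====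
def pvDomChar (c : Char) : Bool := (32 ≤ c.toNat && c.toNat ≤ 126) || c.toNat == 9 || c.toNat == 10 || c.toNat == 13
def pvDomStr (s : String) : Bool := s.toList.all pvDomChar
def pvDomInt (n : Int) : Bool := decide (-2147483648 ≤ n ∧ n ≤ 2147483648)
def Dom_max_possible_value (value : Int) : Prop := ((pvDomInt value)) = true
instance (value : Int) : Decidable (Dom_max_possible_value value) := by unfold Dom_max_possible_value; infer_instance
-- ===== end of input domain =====

-- B replaces A's single-pass index-tracking scans by generate-and-test over all insertion positions (same value, alternative algorithm).

-- ===== PORT A =====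
-- int(char): A only applies it to digit characters of str(value), where it never raises
def pvIntChar (c : Char) : Int := (PySem.Int.ofChars? [c]).getD 0

-- 'for char in vs: if char == "-": idx += 1; continue; if int(char) > 5: break; idx += 1'
def pvNegLoop : List Char → Int → Int
  | [], idx => idx
  | c :: rest, idx =>
    if c = '-' then pvNegLoop rest (idx + 1)
    else if pvIntChar c > 5 then idx
    else pvNegLoop rest (idx + 1)

def max_possible_value (value : Int) : Int :=
  let vs := PySem.Int.toChars value
  let idx : Int :=
    if value < 0 then pvNegLoop vs 0
    else (PySem.List.enumerate vs 0).foldl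
      (fun idx p => if pvIntChar p.2 > 5 then p.1 + 1 else idx) 0
  (PySem.Int.ofChars? (PySem.List.insert vs idx '5')).getD 0

-- ===== PORT B =====
-- 'c <= "5"': Python compares characters by code point, as Lean's ≤ on Char does
def pvLe5 (c : Char) : Bool := decide (c ≤ '5')

def max_possible_value_alt (value : Int) : Int :=
  let s := PySem.Int.toChars value
  let idx : Int :=
    if value < 0 then
      let d := PySem.List.slice s (some 1) none
      1 + ((PySem.List.max? ((PySem.List.pyRange 0 ((d.length : Int) + 1) 1).filter
            (fun j => (PySem.List.slice d none (some j)).all pvLe5)) (fun x => x)).getD 0)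
    else
      (PySem.List.min? ((PySem.List.pyRange 0 ((s.length : Int) + 1) 1).filter
            (fun k => (PySem.List.slice s (some k) none).all pvLe5)) (fun x => x)).getD 0
  (PySem.Int.ofChars? (PySem.List.slice s none (some idx) ++ '5' :: PySem.List.slice s (some idx) none)).getD 0

-- ===== PRECONDITION & SPEC =====
def Spec_max_possible_value (value : Int) (out : Int) : Prop := out = max_possible_value_alt value
instance (value : Int) (out : Int) : Decidable (Spec_max_possible_value value out) := by unfold Spec_max_possible_value; infer_instance

-- ===== CLAIM (what is proved, stated in full; the proofs are below) =====
def Claim_equal_max_possible_value : Prop := ∀ (value : Int), Dom_max_possible_value value → Spec_max_possible_value value (max_possible_value value)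

-- ===== LEMMAS AND PROOFS =====

-- the ten decimal digit characters
def pvDigs : List Char := ['0','1','2','3','4','5','6','7','8','9']

theorem pvDigitChar_mem {m : Nat} (h : m < 10) : Nat.digitChar m ∈ pvDigs := by
  interval_cases m <;> decide

theorem pvToDigitsCore_digits :
    ∀ (f n : Nat) (acc : List Char), (∀ c ∈ acc, c ∈ pvDigs) →
      ∀ c ∈ Nat.toDigitsCore 10 f n acc, c ∈ pvDigs := by
  intro f
  induction f with
  | zero => intro n acc hacc c hc; exact hacc c hc
  | succ f ih =>
    intro n acc hacc c hc
    simp only [Nat.toDigitsCore] at hc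
    by_cases h0 : n / 10 = 0
    · rw [if_pos h0] at hc
      rcases List.mem_cons.mp hc with h | h
      · exact h ▸ pvDigitChar_mem (Nat.mod_lt _ (by norm_num))
      · exact hacc c h
    · rw [if_neg h0] at hc
      refine ih (n / 10) _ ?_ c hc
      intro d hd
      rcases List.mem_cons.mp hd with h | h
      · exact h ▸ pvDigitChar_mem (Nat.mod_lt _ (by norm_num))
      · exact hacc d h

theorem pvToDigits_digits (n : Nat) : ∀ c ∈ Nat.toDigits 10 n, c ∈ pvDigs := by
  intro c hc
  exact pvToDigitsCore_digits (n + 1) n [] (by simp) c hc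

theorem pvDigit_gt5_iff {c : Char} (h : c ∈ pvDigs) :
    (pvIntChar c > 5) ↔ pvLe5 c = false := by
  fin_cases h <;> decide

theorem pvDigit_ne_dash {c : Char} (h : c ∈ pvDigs) : c ≠ '-' := by
  fin_cases h <;> decide

-- A's non-negative loop = length minus the maximal all-≤'5' suffix (stated via takeWhile on the reverse)
theorem pvFold_eq (L : List Char) (h : ∀ c ∈ L, c ∈ pvDigs) :
    (PySem.List.enumerate L 0).foldl
      (fun idx p => if pvIntChar p.2 > 5 then p.1 + 1 else idx) 0
      = ((L.length : Int) - ((L.reverse.takeWhile pvLe5).length : Int)) := by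
  induction L using List.reverseRecOn with
  | nil => simp [PySem.List.enumerate]
  | append_singleton L c ih =>
    have hc : c ∈ pvDigs := h c (by simp)
    have hL : ∀ d ∈ L, d ∈ pvDigs := fun d hd => h d (by simp [hd])
    have henum : PySem.List.enumerate [c] (0 + (L.length : Int)) = [((L.length : Int), c)] := by
      simp [PySem.List.enumerate]
    rw [PySem.List.enumerate_append, List.foldl_append, ih hL, henum]
    simp only [List.foldl_cons, List.foldl_nil]
    rw [List.reverse_append, List.reverse_singleton, List.singleton_append, List.takeWhile_cons]
    by_cases h5 : pvLe5 c = true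
    · have hng : ¬ (pvIntChar c > 5) := by rw [pvDigit_gt5_iff hc]; simp [h5]
      rw [if_neg hng, if_pos h5]
      have hle := (List.takeWhile_prefix (l := L.reverse) pvLe5).length_le
      simp only [List.length_cons, List.length_append, List.length_reverse, List.length_nil] at *
      push_cast
      omega
    · have hg : pvIntChar c > 5 := (pvDigit_gt5_iff hc).mpr (Bool.not_eq_true _ ▸ h5)
      rw [if_pos hg, if_neg h5]
      push_cast [List.length_append]
      simp

-- A's negative loop over the digit part = start index + length of the leading all-≤'5' prefix
theorem pvNegLoop_digits (d : List Char) (idx : Int) (h : ∀ c ∈ d, c ∈ pvDigs) :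
    pvNegLoop d idx = idx + ((d.takeWhile pvLe5).length : Int) := by
  induction d generalizing idx with
  | nil => simp [pvNegLoop]
  | cons c rest ih =>
    have hc : c ∈ pvDigs := h c (by simp)
    have hrest : ∀ x ∈ rest, x ∈ pvDigs := fun x hx => h x (by simp [hx])
    rw [pvNegLoop, if_neg (pvDigit_ne_dash hc), List.takeWhile_cons]
    by_cases h5 : pvLe5 c = true
    · have hng : ¬ (pvIntChar c > 5) := by rw [pvDigit_gt5_iff hc]; simp [h5]
      rw [if_neg hng, ih _ hrest, if_pos h5]
      simp only [List.length_cons]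
      push_cast
      ring
    · have hg : pvIntChar c > 5 := (pvDigit_gt5_iff hc).mpr (Bool.not_eq_true _ ▸ h5)
      rw [if_pos hg, if_neg h5]
      simp

-- min()/max() with a unique extremal element
theorem pvMin?_eq {xs : List Int} {r : Int} (hmem : r ∈ xs) (hmin : ∀ y ∈ xs, r ≤ y) :
    PySem.List.min? xs (fun x => x) = some r := by
  cases h : PySem.List.min? xs (fun x => x) with
  | none =>
    rw [PySem.List.min?_eq_none_iff] at h
    simp [h] at hmem
  | some m =>
    have h1 : m ≤ r := PySem.List.min?_isMin h r hmem
    have h2 : r ≤ m := hmin m (PySem.List.min?_mem h)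
    rw [le_antisymm h1 h2]

theorem pvMax?_eq {xs : List Int} {r : Int} (hmem : r ∈ xs) (hmax : ∀ y ∈ xs, y ≤ r) :
    PySem.List.max? xs (fun x => x) = some r := by
  cases h : PySem.List.max? xs (fun x => x) with
  | none =>
    rw [PySem.List.max?_eq_none_iff] at h
    simp [h] at hmem
  | some m =>
    have h1 : r ≤ m := PySem.List.max?_isMax h r hmem
    have h2 : m ≤ r := hmax m (PySem.List.max?_mem h)
    rw [le_antisymm h2 h1]

-- a prefix of d passing p entirely is no longer than d.takeWhile p
theorem pvTake_all_le (p : Char → Bool) :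
    ∀ (d : List Char) (k : Nat), k ≤ d.length → (d.take k).all p = true →
      k ≤ (d.takeWhile p).length := by
  intro d
  induction d with
  | nil => intro k hk _; simpa using hk
  | cons c rest ih =>
    intro k hk hall
    cases k with
    | zero => exact Nat.zero_le _
    | succ k =>
      simp only [List.take_succ_cons, List.all_cons, Bool.and_eq_true] at hall
      rw [List.takeWhile_cons, if_pos hall.1]
      simpa using ih k (by simpa using hk) hall.2

-- taking exactly the takeWhile length gives the takeWhile, which passes p
theorem pvTake_takeWhile_all (p : Char → Bool) (d : List Char) :
    (d.take (d.takeWhile p).length).all p = true := by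
  rw [← List.prefix_iff_eq_take.mp (List.takeWhile_prefix p)]
  exact List.all_takeWhile

-- with a common index 0 ≤ k ≤ len, A's insert and B's slices build the same list
theorem pvBuild_eq (vs : List Char) (k : Nat) (hk : k ≤ vs.length) :
    PySem.List.insert vs (k : Int) '5'
      = PySem.List.slice vs none (some (k : Int)) ++ '5' :: PySem.List.slice vs (some (k : Int)) none := by
  rw [PySem.List.insert_natCast vs k '5' hk,
      PySem.List.slice_to vs (by positivity), PySem.List.slice_from vs (by positivity)]
  simp

-- ===== VERDICT (by name: the statement is the Claim_ definition above) =====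
theorem max_possible_value_spec : Claim_equal_max_possible_value := by
  intro value _
  unfold Spec_max_possible_value max_possible_value max_possible_value_alt
  by_cases hneg : value < 0
  · -- negative branch
    have hvs : PySem.Int.toChars value = '-' :: Nat.toDigits 10 value.natAbs := by
      simp [PySem.Int.toChars, hneg]
    set d := Nat.toDigits 10 value.natAbs with hd
    have hdig : ∀ c ∈ d, c ∈ pvDigs := pvToDigits_digits _
    simp only [hvs, if_pos hneg]
    have hslice : PySem.List.slice ('-' :: d) (some 1) none = d := by
      rw [PySem.List.slice_from _ (by norm_num)]
      simp
    set tl : Nat := (d.takeWhile pvLe5).length with htl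
    have htlle : tl ≤ d.length := (List.takeWhile_prefix (l := d) pvLe5).length_le
    have hloop : pvNegLoop ('-' :: d) 0 = 1 + (tl : Int) := by
      rw [pvNegLoop, if_pos rfl, pvNegLoop_digits d _ hdig, ← htl]
      ring
    -- B's max over qualifying prefixes is exactly tl
    have hmax : PySem.List.max? ((PySem.List.pyRange 0 ((d.length : Int) + 1) 1).filter
        (fun j => (PySem.List.slice d none (some j)).all pvLe5)) (fun x => x) = some (tl : Int) := by
      apply pvMax?_eq
      · apply List.mem_filter.mpr
        constructor
        · exact PySem.List.mem_pyRange_one.mpr ⟨by positivity, by exact_mod_cast Nat.lt_succ_of_le htlle⟩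
        · rw [PySem.List.slice_to _ (by positivity)]
          simpa using pvTake_takeWhile_all pvLe5 d
      · intro y hy
        obtain ⟨hyr, hyq⟩ := List.mem_filter.mp hy
        obtain ⟨hy0, hylt⟩ := PySem.List.mem_pyRange_one.mp hyr
        rw [PySem.List.slice_to _ hy0] at hyq
        have hyn : y.toNat ≤ d.length := by omega
        have := pvTake_all_le pvLe5 d y.toNat hyn (by simpa using hyq)
        omega
    rw [hslice, hloop, hmax, Option.getD_some]
    have hk : 1 + tl ≤ ('-' :: d).length := by simp; omega
    have hcast : (1 : Int) + (tl : Int) = ((1 + tl : Nat) : Int) := by push_cast; ring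
    rw [hcast, pvBuild_eq ('-' :: d) (1 + tl) hk]
  · -- non-negative branch
    have hvs : PySem.Int.toChars value = Nat.toDigits 10 value.toNat := by
      simp [PySem.Int.toChars, hneg]
    set L := Nat.toDigits 10 value.toNat with hL
    have hdig : ∀ c ∈ L, c ∈ pvDigs := pvToDigits_digits _
    simp only [hvs, if_neg hneg]
    set tl : Nat := (L.reverse.takeWhile pvLe5).length with htl
    have htlle : tl ≤ L.length := by
      have := (List.takeWhile_prefix (l := L.reverse) pvLe5).length_le
      simpa using this
    -- B's min over qualifying suffix starts is exactly L.length - tl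
    have hmin : PySem.List.min? ((PySem.List.pyRange 0 ((L.length : Int) + 1) 1).filter
        (fun k => (PySem.List.slice L (some k) none).all pvLe5)) (fun x => x)
        = some ((L.length - tl : Nat) : Int) := by
      apply pvMin?_eq
      · apply List.mem_filter.mpr
        constructor
        · exact PySem.List.mem_pyRange_one.mpr ⟨by positivity, by exact_mod_cast Nat.lt_succ_of_le (Nat.sub_le _ _)⟩
        · rw [PySem.List.slice_from _ (by positivity)]
          have hdrop : L.drop ((L.length - tl : Nat) : Int).toNat = (L.reverse.takeWhile pvLe5).reverse := by
            have h1 : (L.drop (L.length - tl)).reverse = L.reverse.take tl := by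
              rw [List.reverse_drop]
              congr 1
              omega
            have h2 : L.reverse.take tl = L.reverse.takeWhile pvLe5 := by
              rw [htl, ← List.prefix_iff_eq_take.mp (List.takeWhile_prefix pvLe5)]
            rw [Int.toNat_natCast, ← List.reverse_reverse (L.drop _), h1, h2]
          simp only [hdrop, List.all_reverse]
          exact List.all_takeWhile
      · intro y hy
        obtain ⟨hyr, hyq⟩ := List.mem_filter.mp hy
        obtain ⟨hy0, hylt⟩ := PySem.List.mem_pyRange_one.mp hyr
        rw [PySem.List.slice_from _ hy0] at hyq
        have hyn : y.toNat ≤ L.length := by omega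
        have hall : (L.reverse.take (L.length - y.toNat)).all pvLe5 = true := by
          rw [← List.reverse_drop, List.all_reverse]
          exact hyq
        have := pvTake_all_le pvLe5 L.reverse (L.length - y.toNat) (by simp) hall
        omega
    rw [pvFold_eq L hdig, hmin, Option.getD_some]
    have hcast : (L.length : Int) - (tl : Int) = ((L.length - tl : Nat) : Int) := by omega
    rw [hcast, pvBuild_eq L (L.length - tl) (Nat.sub_le _ _)]
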